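-- pv_equiv track=rewrite | github.com/Ag3497120/verantyx-v6 | arc/world_commands.py | _extract_panels_v
-- ===== SOURCE A (Python) =====
-- from collections import Counter, defaultdict
--
-- def _bg(g):
--     c = Counter()
--     for row in g: c.update(row)
--     return c.most_common(1)[0][0]
--
-- def _find_sep_cols(g, bg):
--     h,w=len(g),len(g[0])
--     sep=[]
--     for c in range(w):
--         col_colors=set(g[r][c] for r in range(h))
--         if len(col_colors)==1 and g[0][c]!=bg:
--             sep.append((c,g[0][c]))
--     return sep
--
-- def _extract_panels_v(g):
--     bg=_bg(g); h,w=len(g),len(g[0])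
--     seps=_find_sep_cols(g,bg)
--     if not seps: return [g]
--     bounds=[-1]+[c for c,_ in seps]+[w]
--     panels=[]
--     for i in range(len(bounds)-1):
--         cs,ce=bounds[i]+1,bounds[i+1]
--         if cs<ce: panels.append([[g[r][c] for c in range(cs,ce)] for r in range(h)])
--     return panels
-- ===== SOURCE B (Python) =====
-- from collections import Counter
--
-- def _bg(g):
--     c = Counter()
--     for row in g: c.update(row)
--     return c.most_common(1)[0][0]
--
-- def _extract_panels_v(g):
--     bg = _bg(g)
--     h, w = len(g), len(g[0])
--     panels = []
--     acc = []          # column indices of the panel being built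
--     any_sep = False
--     for c in range(w):
--         col = [g[r][c] for r in range(h)]
--         if all(v == col[0] for v in col) and col[0] != bg:
--             any_sep = True
--             if acc:
--                 panels.append([[g[r][c2] for c2 in acc] for r in range(h)])
--                 acc = []
--         else:
--             acc.append(c)
--     if acc:
--         panels.append([[g[r][c2] for c2 in acc] for r in range(h)])
--     if not any_sep:
--         return [g]
--     return panels
-- ===== Notes on version B (the rewrite author's own statement) =====
-- stated objective: alternative
-- what changed: B replaces A's three-phase pipeline (collect all separator columns, build a bounds list, slice panels out of the grid by index pairs) with a single left-to-right sweep over columns that classifies each column and accumulates the current panel's column indices, flushing a panel at each separator and once at the end.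
import Mathlib
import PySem

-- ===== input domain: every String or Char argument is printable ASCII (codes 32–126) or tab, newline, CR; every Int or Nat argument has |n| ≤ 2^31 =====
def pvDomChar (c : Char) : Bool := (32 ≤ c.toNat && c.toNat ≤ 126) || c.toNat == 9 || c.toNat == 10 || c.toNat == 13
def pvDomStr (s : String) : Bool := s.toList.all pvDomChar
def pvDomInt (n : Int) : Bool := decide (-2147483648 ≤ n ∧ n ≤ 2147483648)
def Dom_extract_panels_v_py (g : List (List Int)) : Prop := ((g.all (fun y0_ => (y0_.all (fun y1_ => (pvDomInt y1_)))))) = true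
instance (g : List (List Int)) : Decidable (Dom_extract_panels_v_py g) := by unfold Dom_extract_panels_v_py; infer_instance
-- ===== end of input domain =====

-- B replaces A's collect-separators / bounds-list / slice-by-index-pairs pipeline with one
-- left-to-right sweep that accumulates the current panel's column indices and flushes at each
-- separator (objective: alternative decomposition, same cost).

-- ===== PORT A =====

-- _bg(g): Counter over all cells; most_common(1)[0][0] = first key of the count-descending
-- stable sort of the counter's items (CPython's nlargest rule). Returns none exactly where
-- Python raises IndexError (no cells at all); that case is outside Pre_.
def pvBg? (g : List (List Int)) : Option Int :=
  let c : PySem.Dict Int Int :=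
    g.foldl (fun d row => row.foldl (fun d x => PySem.Dict.modify d x 0 (· + 1)) d) PySem.Dict.empty
  match PySem.List.sorted c.items (fun p => p.2) true with
  | [] => none
  | p :: _ => some p.1

-- the panel comprehension [[g[r][c] for c in run] for r in range(h)] (shared literally by both
-- Pythons: A passes run = range(cs,ce), B passes its accumulated column list)
def pvPanel (g : List (List Int)) (h : Int) (run : List Int) : List (List Int) :=
  (PySem.List.pyRange 0 h).map (fun r => run.map (fun c => PySem.List.pyGetD (PySem.List.pyGetD g r []) c 0))

-- _extract_panels_v(g), A's code: _find_sep_cols inlined as the first foldl (its only call site);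
-- g[r][c] is ported with pyGetD (always in range on Pre_; Python raises outside Pre_).
def extract_panels_v_py (g : List (List Int)) : List (List (List Int)) :=
  match pvBg? g with
  | none => []   -- Python raises IndexError here (grid with no cells); excluded by Pre_
  | some bg =>
    let h : Int := (g.length : Int)
    let w : Int := ((PySem.List.pyGetD g 0 []).length : Int)
    let seps : List (Int × Int) :=
      (PySem.List.pyRange 0 w).foldl (fun sep c =>
        let colColors : PySem.Set Int :=
          PySem.Set.ofList ((PySem.List.pyRange 0 h).map (fun r => PySem.List.pyGetD (PySem.List.pyGetD g r []) c 0))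
        if colColors.length == 1 && PySem.List.pyGetD (PySem.List.pyGetD g 0 []) c 0 != bg then
          sep ++ [(c, PySem.List.pyGetD (PySem.List.pyGetD g 0 []) c 0)]
        else sep) []
    if seps.isEmpty then [g]
    else
      let bounds : List Int := -1 :: (seps.map (·.1) ++ [w])
      (PySem.List.pyRange 0 ((bounds.length : Int) - 1)).foldl (fun panels i =>
        let cs := PySem.List.pyGetD bounds i 0 + 1
        let ce := PySem.List.pyGetD bounds (i + 1) 0
        if cs < ce then panels ++ [pvPanel g h (PySem.List.pyRange cs ce)] else panels) []

-- ===== PORT B =====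

-- one sweep: state = (panels so far, column indices of the panel being built, any separator seen)
def extract_panels_v_py_alt (g : List (List Int)) : List (List (List Int)) :=
  match pvBg? g with
  | none => []   -- same _bg call raises here in Python; excluded by Pre_
  | some bg =>
    let h : Int := (g.length : Int)
    let w : Int := ((PySem.List.pyGetD g 0 []).length : Int)
    let st : List (List (List Int)) × List Int × Bool :=
      (PySem.List.pyRange 0 w).foldl (fun st c =>
        let col := (PySem.List.pyRange 0 h).map (fun r => PySem.List.pyGetD (PySem.List.pyGetD g r []) c 0)
        if col.all (fun v => v == col.headD 0) && col.headD 0 != bg then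
          (if st.2.1.isEmpty then st.1 else st.1 ++ [pvPanel g h st.2.1], [], true)
        else (st.1, st.2.1 ++ [c], st.2.2)) ([], [], false)
    let panels := if st.2.1.isEmpty then st.1 else st.1 ++ [pvPanel g h st.2.1]
    if st.2.2 then panels else [g]

-- ===== PRECONDITION & SPEC =====
-- Pre_ excludes exactly the inputs on which the Python A raises: an empty grid / a grid whose
-- rows are all empty (IndexError in _bg's most_common(1)[0]) and a grid with some row shorter
-- than row 0 (IndexError on g[r][c] in _find_sep_cols).
def Pre_extract_panels_v_py (g : List (List Int)) : Prop :=
  g ≠ [] ∧ (∃ row ∈ g, row ≠ []) ∧ ∀ row ∈ g, (PySem.List.pyGetD g 0 []).length ≤ row.length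
instance (g : List (List Int)) : Decidable (Pre_extract_panels_v_py g) := by
  unfold Pre_extract_panels_v_py; infer_instance

def pvWitness_extract_panels_v_py : List (List Int) := [[1, 5, 2], [1, 5, 2]]

def Spec_extract_panels_v_py (g : List (List Int)) (out : List (List (List Int))) : Prop :=
  out = extract_panels_v_py_alt g
instance (g : List (List Int)) (out : List (List (List Int))) : Decidable (Spec_extract_panels_v_py g out) := by
  unfold Spec_extract_panels_v_py; infer_instance

-- ===== CLAIM (what is proved, stated in full; the proofs are below) =====
def Claim_equal_extract_panels_v_py : Prop :=
  ∀ (g : List (List Int)), Dom_extract_panels_v_py g → Pre_extract_panels_v_py g →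
    Spec_extract_panels_v_py g (extract_panels_v_py g)

-- ===== LEMMAS AND PROOFS =====

-- A's separator test on column c (column constant and not background)
def sepP (g : List (List Int)) (bg h : Int) (c : Int) : Bool :=
  ((PySem.Set.ofList ((PySem.List.pyRange 0 h).map (fun r => PySem.List.pyGetD (PySem.List.pyGetD g r []) c 0))).length == 1)
  && PySem.List.pyGetD (PySem.List.pyGetD g 0 []) c 0 != bg

-- maximal runs of non-separator columns, threaded through an accumulator (the common
-- normal form both loops are reduced to)
def collect (p : Int → Bool) : List Int → List Int → List (List Int)
  | acc, [] => if acc.isEmpty then [] else [acc]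
  | acc, c :: cs =>
      if p c then (if acc.isEmpty then collect p [] cs else acc :: collect p [] cs)
      else collect p (acc ++ [c]) cs

theorem foldl_setAdd_length_le (t : List Int) (s : PySem.Set Int) :
    s.length ≤ (List.foldl PySem.Set.add s t).length := by
  induction t generalizing s with
  | nil => simp
  | cons v t ih =>
    refine le_trans ?_ (ih (PySem.Set.add s v))
    simp [PySem.Set.add]
    split <;> simp

theorem setLen1 (x : Int) (t : List Int) :
    ((PySem.Set.ofList (x :: t)).length == 1) = t.all (fun v => v == x) := by
  have h : ∀ (t : List Int), ((List.foldl PySem.Set.add [x] t).length == 1) = t.all (fun v => v == x) := by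
    intro t
    induction t with
    | nil => simp
    | cons v t ih =>
      by_cases hv : v = x
      · subst hv
        simp [List.foldl_cons, PySem.Set.add, PySem.Set.contains, ih]
      · have : PySem.Set.add [x] v = [x, v] := by
          simp [PySem.Set.add, PySem.Set.contains, hv]
        simp only [List.foldl_cons, this]
        have h2 : 2 ≤ (List.foldl PySem.Set.add [x, v] t).length := foldl_setAdd_length_le t [x, v]
        have : ((List.foldl PySem.Set.add [x, v] t).length == 1) = false := by
          simp; omega
        simp [this, List.all_cons, hv]
  have : PySem.Set.ofList (x :: t) = List.foldl PySem.Set.add [x] t := by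
    simp [PySem.Set.ofList_eq_foldl, PySem.Set.add, PySem.Set.contains]
  rw [this, h]

-- B's inline test equals A's set-based test (the column list is nonempty since g ≠ [])
theorem testEq (g : List (List Int)) (bg : Int) (hg : g ≠ []) (c : Int) :
    (let col := (PySem.List.pyRange 0 (g.length : Int)).map (fun r => PySem.List.pyGetD (PySem.List.pyGetD g r []) c 0)
     col.all (fun v => v == col.headD 0) && col.headD 0 != bg)
    = sepP g bg (g.length : Int) c := by
  have hlen : (0 : Int) < (g.length : Int) := by
    have : g.length ≠ 0 := by simpa [List.length_eq_zero_iff] using hg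
    omega
  simp only [sepP]
  rw [PySem.List.pyRange_one_cons hlen]
  simp only [List.map_cons, List.headD_cons, setLen1, List.all_cons, beq_self_eq_true,
    Bool.true_and]

-- characterisation of B's sweep (+ final flush) in terms of collect
theorem bLemma (p : Int → Bool) (mk : List Int → List (List Int)) :
    ∀ (cols : List Int) (panels : List (List (List Int))) (acc : List Int) (b : Bool),
    (let st := cols.foldl (fun (st : List (List (List Int)) × List Int × Bool) c =>
        if p c then (if st.2.1.isEmpty then st.1 else st.1 ++ [mk st.2.1], ([] : List Int), true)
        else (st.1, st.2.1 ++ [c], st.2.2)) (panels, acc, b)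
     ((if st.2.1.isEmpty then st.1 else st.1 ++ [mk st.2.1]), st.2.2))
    = (panels ++ (collect p acc cols).map mk, b || cols.any p) := by
  intro cols
  induction cols with
  | nil =>
    intro panels acc b
    simp only [List.foldl_nil, List.any_nil, Bool.or_false, collect]
    by_cases ha : acc.isEmpty <;> simp [ha]
  | cons c cs ih =>
    intro panels acc b
    simp only [List.foldl_cons, List.any_cons, collect]
    by_cases hc : p c
    · simp only [hc, if_true]
      by_cases ha : acc.isEmpty
      · rw [ih]; simp [ha]
      · rw [ih]; simp [ha, List.append_assoc]
    · simp only [hc]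
      rw [ih]
      simp

-- characterisation of A's bounds/slice loop (as a fold over consecutive bound pairs)
theorem segLemma (p : Int → Bool) (mk : List Int → List (List Int)) :
    ∀ (fuel : Nat) (lo prev w : Int) (panels : List (List (List Int))),
    prev + 1 ≤ lo → lo ≤ w → (w - lo).toNat ≤ fuel →
    List.foldl (fun panels (pr : Int × Int) =>
        if pr.1 + 1 < pr.2 then panels ++ [mk (PySem.List.pyRange (pr.1 + 1) pr.2)] else panels) panels
      ((prev :: ((PySem.List.pyRange lo w).filter p ++ [w])).zip ((PySem.List.pyRange lo w).filter p ++ [w]))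
    = panels ++ (collect p (PySem.List.pyRange (prev + 1) lo) (PySem.List.pyRange lo w)).map mk := by
  intro fuel
  induction fuel with
  | zero =>
    intro lo prev w panels h1 h2 h3
    have hw : lo = w := by omega
    subst hw
    rw [PySem.List.pyRange_one_eq_nil (le_refl lo)]
    simp only [List.filter_nil, List.nil_append, List.zip_cons_cons, List.zip_nil_right,
      List.foldl_cons, List.foldl_nil, collect]
    by_cases hlt : prev + 1 < lo
    · have : ¬ (PySem.List.pyRange (prev + 1) lo).isEmpty := by
        rw [PySem.List.pyRange_one_cons hlt]; simp
      simp [hlt, this]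
    · have : PySem.List.pyRange (prev + 1) lo = [] := PySem.List.pyRange_one_eq_nil (by omega)
      simp [hlt, this]
  | succ fuel ih =>
    intro lo prev w panels h1 h2 h3
    by_cases hlw : lo < w
    · rw [PySem.List.pyRange_one_cons hlw]
      by_cases hp : p lo
      · simp only [List.filter_cons, hp, if_true, List.cons_append, List.zip_cons_cons,
          List.foldl_cons, collect]
        rw [ih (lo + 1) lo w _ (by omega) (by omega) (by omega)]
        have hnil : PySem.List.pyRange (lo + 1) (lo + 1) = [] :=
          PySem.List.pyRange_one_eq_nil (le_refl _)
        by_cases hlt : prev + 1 < lo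
        · have hne : ¬ (PySem.List.pyRange (prev + 1) lo).isEmpty := by
            rw [PySem.List.pyRange_one_cons hlt]; simp
          simp [hlt, hne, hnil, List.append_assoc]
        · have hn : PySem.List.pyRange (prev + 1) lo = [] := PySem.List.pyRange_one_eq_nil (by omega)
          simp [hlt, hn, hnil]
      · simp only [List.filter_cons, hp, Bool.false_eq_true, if_false, collect]
        rw [ih (lo + 1) prev w panels (by omega) (by omega) (by omega)]
        have : PySem.List.pyRange (prev + 1) lo ++ [lo] = PySem.List.pyRange (prev + 1) (lo + 1) :=
          (PySem.List.pyRange_one_succ_right (by omega)).symm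
        rw [this]
    · have hw : lo = w := by omega
      subst hw
      rw [PySem.List.pyRange_one_eq_nil (le_refl lo)]
      simp only [List.filter_nil, List.nil_append, List.zip_cons_cons, List.zip_nil_right,
        List.foldl_cons, List.foldl_nil, collect]
      by_cases hlt : prev + 1 < lo
      · have : ¬ (PySem.List.pyRange (prev + 1) lo).isEmpty := by
          rw [PySem.List.pyRange_one_cons hlt]; simp
        simp [hlt, this]
      · have : PySem.List.pyRange (prev + 1) lo = [] := PySem.List.pyRange_one_eq_nil (by omega)
        simp [hlt, this]


-- A's index loop over bounds[i], bounds[i+1] is the fold over consecutive pairs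
theorem idxfold (mk : List Int → List (List Int)) (rest : List Int) (b0 : Int)
    (init : List (List (List Int))) :
    (PySem.List.pyRange 0 (((b0 :: rest).length : Int) - 1)).foldl (fun panels i =>
        let cs := PySem.List.pyGetD (b0 :: rest) i 0 + 1
        let ce := PySem.List.pyGetD (b0 :: rest) (i + 1) 0
        if cs < ce then panels ++ [mk (PySem.List.pyRange cs ce)] else panels) init
    = List.foldl (fun panels (pr : Int × Int) =>
        if pr.1 + 1 < pr.2 then panels ++ [mk (PySem.List.pyRange (pr.1 + 1) pr.2)] else panels) init
        ((b0 :: rest).zip rest) := by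
  have hzlen : ((b0 :: rest).zip rest).length = rest.length := by
    simp [List.length_zip]
  have hlen : (((b0 :: rest).length : Int) - 1) = PySem.List.len ((b0 :: rest).zip rest) := by
    simp [PySem.List.len, hzlen]
  rw [hlen]
  rw [PySem.List.foldl_congr_mem _ _
    (fun panels i => (fun (acc : List (List (List Int))) (pr : Int × Int) =>
        if pr.1 + 1 < pr.2 then acc ++ [mk (PySem.List.pyRange (pr.1 + 1) pr.2)] else acc)
      panels (PySem.List.pyGetD ((b0 :: rest).zip rest) i ((0 : Int), (0 : Int)))) init ?_]
  · exact PySem.List.foldl_pyRange_zero_pyGetD ((b0 :: rest).zip rest) ((0 : Int), (0 : Int))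
      (fun acc pr => if pr.1 + 1 < pr.2 then acc ++ [mk (PySem.List.pyRange (pr.1 + 1) pr.2)] else acc) init
  · intro acc i hi
    rw [PySem.List.mem_pyRange_one] at hi
    obtain ⟨h0, h1⟩ := hi
    simp only [PySem.List.len, hzlen] at h1
    have hi1 : i.toNat < ((b0 :: rest).zip rest).length := by rw [hzlen]; omega
    have hir : i.toNat < rest.length := by omega
    have e1 : PySem.List.pyGetD ((b0 :: rest).zip rest) i ((0 : Int), (0 : Int))
        = ((b0 :: rest)[i.toNat]'(by simp; omega), rest[i.toNat]'hir) := by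
      rw [PySem.List.pyGetD_eq_getElem _ _ h0 (by rw [hzlen]; exact h1)]
      exact List.getElem_zip
    have e2 : PySem.List.pyGetD (b0 :: rest) i 0 = (b0 :: rest)[i.toNat]'(by simp; omega) :=
      PySem.List.pyGetD_eq_getElem _ _ h0 (by simp; omega)
    have e3 : PySem.List.pyGetD (b0 :: rest) (i + 1) 0 = rest[i.toNat]'hir := by
      rw [PySem.List.pyGetD_eq_getElem _ _ (by omega) (by simp; omega)]
      have : (i + 1).toNat = i.toNat + 1 := by omega
      simp [this]
    simp only [e1, e2, e3]

-- ===== VERDICT (by name: the statement is the Claim_ definition above) =====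
theorem extract_panels_v_py_spec : Claim_equal_extract_panels_v_py := by
  intro g _hdom hpre
  obtain ⟨hg, -, -⟩ := hpre
  unfold Spec_extract_panels_v_py extract_panels_v_py extract_panels_v_py_alt
  cases hbg : pvBg? g with
  | none => rfl
  | some bg =>
    simp only []
    -- shared abbreviations
    have hh0 : (0 : Int) ≤ ((PySem.List.pyGetD g 0 []).length : Int) := by positivity
    -- A's separator loop is an append-filter loop over sepP
    have hsep : (fun (sep : List (Int × Int)) (c : Int) =>
        let colColors : PySem.Set Int :=
          PySem.Set.ofList ((PySem.List.pyRange 0 (g.length : Int)).map (fun r => PySem.List.pyGetD (PySem.List.pyGetD g r []) c 0))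
        if colColors.length == 1 && PySem.List.pyGetD (PySem.List.pyGetD g 0 []) c 0 != bg then
          sep ++ [(c, PySem.List.pyGetD (PySem.List.pyGetD g 0 []) c 0)]
        else sep)
        = (fun sep c => if sepP g bg (g.length : Int) c then
            sep ++ [(c, PySem.List.pyGetD (PySem.List.pyGetD g 0 []) c 0)] else sep) := by
      funext sep c; simp only [sepP]; rfl
    rw [hsep, PySem.List.foldl_append_if (sepP g bg (g.length : Int))
      (fun c => (c, PySem.List.pyGetD (PySem.List.pyGetD g 0 []) c 0))]
    -- B's sweep step is the abstract step over sepP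
    have hstep : (fun (st : List (List (List Int)) × List Int × Bool) (c : Int) =>
        let col := (PySem.List.pyRange 0 (g.length : Int)).map (fun r => PySem.List.pyGetD (PySem.List.pyGetD g r []) c 0)
        if col.all (fun v => v == col.headD 0) && col.headD 0 != bg then
          (if st.2.1.isEmpty then st.1 else st.1 ++ [pvPanel g (g.length : Int) st.2.1], ([] : List Int), true)
        else (st.1, st.2.1 ++ [c], st.2.2))
        = (fun st c => if sepP g bg (g.length : Int) c then
            (if st.2.1.isEmpty then st.1 else st.1 ++ [pvPanel g (g.length : Int) st.2.1], ([] : List Int), true)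
          else (st.1, st.2.1 ++ [c], st.2.2)) := by
      funext st c
      rw [← testEq g bg hg c]
    rw [hstep]
    have hB := bLemma (sepP g bg (g.length : Int)) (pvPanel g (g.length : Int))
      (PySem.List.pyRange 0 ((PySem.List.pyGetD g 0 []).length : Int)) [] [] false
    simp only [] at hB
    have hB1 := congrArg Prod.fst hB
    have hB2 := congrArg Prod.snd hB
    simp only [] at hB1 hB2
    rw [hB1, hB2]
    -- case split on whether any separator column exists
    cases hany : (PySem.List.pyRange 0 ((PySem.List.pyGetD g 0 []).length : Int)).any (sepP g bg (g.length : Int)) with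
    | false =>
      have hF : (PySem.List.pyRange 0 ((PySem.List.pyGetD g 0 []).length : Int)).filter (sepP g bg (g.length : Int)) = [] := by
        rw [List.filter_eq_nil_iff]
        intro a ha
        have := List.any_eq_false.mp hany a ha
        simpa using this
      simp [hF]
    | true =>
      have hF : (PySem.List.pyRange 0 ((PySem.List.pyGetD g 0 []).length : Int)).filter (sepP g bg (g.length : Int)) ≠ [] := by
        obtain ⟨x, hx, hpx⟩ := List.any_eq_true.mp hany
        intro hcon
        have : x ∈ (PySem.List.pyRange 0 ((PySem.List.pyGetD g 0 []).length : Int)).filter (sepP g bg (g.length : Int)) :=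
          List.mem_filter.mpr ⟨hx, hpx⟩
        simp [hcon] at this
      have hne : (((PySem.List.pyRange 0 ((PySem.List.pyGetD g 0 []).length : Int)).filter (sepP g bg (g.length : Int))).map
          (fun c => (c, PySem.List.pyGetD (PySem.List.pyGetD g 0 []) c 0))).isEmpty = false := by
        simp [hF]
      simp only [List.nil_append, hne, Bool.false_eq_true, if_false]
      -- bounds = -1 :: (filtered ++ [w])
      have hmap : (((PySem.List.pyRange 0 ((PySem.List.pyGetD g 0 []).length : Int)).filter (sepP g bg (g.length : Int))).map
            (fun c => (c, PySem.List.pyGetD (PySem.List.pyGetD g 0 []) c 0))).map (fun pr => pr.1)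
          = (PySem.List.pyRange 0 ((PySem.List.pyGetD g 0 []).length : Int)).filter (sepP g bg (g.length : Int)) := by
        simp [List.map_map, Function.comp_def]
      rw [hmap]
      rw [idxfold (pvPanel g (g.length : Int))
        ((PySem.List.pyRange 0 ((PySem.List.pyGetD g 0 []).length : Int)).filter (sepP g bg (g.length : Int)) ++ [((PySem.List.pyGetD g 0 []).length : Int)]) (-1) []]
      rw [segLemma (sepP g bg (g.length : Int)) (pvPanel g (g.length : Int))
        ((PySem.List.pyGetD g 0 []).length : Int).toNat 0 (-1) ((PySem.List.pyGetD g 0 []).length : Int) []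
        (by omega) hh0 (by omega)]
      have h00 : PySem.List.pyRange (-1 + 1) 0 = [] := PySem.List.pyRange_one_eq_nil (by omega)
      rw [h00]
      simp
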